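-- pv_equiv track=rewrite | github.com/yanboANU/HaploDivide | analyse_alignment/count_indel_rate_bam.py | calc_same_len
-- ===== SOURCE A (Python) =====
-- def calc_same_len(c):
--     sameLen = 1
--     mid = int(len(c)/2)
--     for i in range(mid+1, len(c)):
--         if c[i] == c[mid]:
--             sameLen += 1
--         else:
--             break
--     for i in range(mid-1, -1, -1):
--         if c[i] == c[mid]:
--             sameLen += 1
--         else:
--             break
--     return sameLen
-- ===== SOURCE B (Python) =====
-- def calc_same_len(c):
--     # Single forward pass over neighbour pairs, tracking the start of the
--     # current maximal run; return the length of the run containing the midpoint.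
--     mid = len(c) // 2
--     start = 0
--     for i in range(1, len(c)):
--         if c[i] != c[i - 1]:
--             if start <= mid < i:
--                 return i - start
--             start = i
--     if start <= mid < len(c):
--         return len(c) - start
--     return 1
-- ===== Notes on version B (the rewrite author's own statement) =====
-- stated objective: alternative
-- what changed: A expands outward from the midpoint with two directional loops comparing each char to c[mid]; B makes one forward pass over neighbour pairs tracking the start of the current maximal run and returns the length of the run containing the midpoint.
import Mathlib
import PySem

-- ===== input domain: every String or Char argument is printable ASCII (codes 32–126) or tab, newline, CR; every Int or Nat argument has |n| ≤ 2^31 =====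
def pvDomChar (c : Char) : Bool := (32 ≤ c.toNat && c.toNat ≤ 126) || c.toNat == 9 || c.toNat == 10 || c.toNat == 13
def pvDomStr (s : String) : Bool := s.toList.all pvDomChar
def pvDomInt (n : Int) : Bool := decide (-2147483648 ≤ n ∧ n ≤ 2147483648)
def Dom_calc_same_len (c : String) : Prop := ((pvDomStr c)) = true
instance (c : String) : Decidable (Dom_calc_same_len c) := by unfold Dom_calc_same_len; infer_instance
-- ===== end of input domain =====

-- B replaces A's two outward loops from the midpoint by one forward neighbour-pair
-- pass that tracks the start of the current maximal run (alternative decomposition).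

-- ===== PORT A =====
-- first loop: for i in range(mid+1, len(c)): if c[i]==c[mid]: sameLen+=1 else break
def pvALoopUp (l : List Char) (mid i : Nat) (s : Int) : Int :=
  if i < l.length then
    if l.getD i ' ' = l.getD mid ' ' then pvALoopUp l mid (i + 1) (s + 1) else s
  else s
termination_by l.length - i

-- second loop: for i in range(mid-1, -1, -1): …  (argument k is current index + 1)
def pvALoopDown (l : List Char) (mid : Nat) : Nat → Int → Int
  | 0, s => s
  | k + 1, s => if l.getD k ' ' = l.getD mid ' ' then pvALoopDown l mid k (s + 1) else s

def calc_same_len (c : String) : Int :=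
  let l := c.toList
  let mid := l.length / 2        -- int(len(c)/2) = len(c) // 2 for nonnegative lengths
  pvALoopDown l mid mid (pvALoopUp l mid (mid + 1) 1)

-- ===== PORT B =====
-- for i in range(1, len(c)): neighbour comparison, `start` = start of current run
def pvBLoop (l : List Char) (mid i start : Nat) : Int :=
  if i < l.length then
    if l.getD i ' ' ≠ l.getD (i - 1) ' ' then
      if start ≤ mid ∧ mid < i then (i : Int) - (start : Int)
      else pvBLoop l mid (i + 1) i
    else pvBLoop l mid (i + 1) start
  else if start ≤ mid ∧ mid < l.length then (l.length : Int) - (start : Int) else 1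
termination_by l.length - i

def calc_same_len_alt (c : String) : Int :=
  pvBLoop c.toList (c.toList.length / 2) 1 0

-- ===== PRECONDITION & SPEC =====
def Spec_calc_same_len (c : String) (out : Int) : Prop := out = calc_same_len_alt c
instance (c : String) (out : Int) : Decidable (Spec_calc_same_len c out) := by unfold Spec_calc_same_len; infer_instance

-- ===== CLAIM (what is proved, stated in full; the proofs are below) =====
def Claim_equal_calc_same_len : Prop := ∀ (c : String), Dom_calc_same_len c → Spec_calc_same_len c (calc_same_len c)

-- ===== LEMMAS AND PROOFS =====

-- number of consecutive indices j ≥ i with l[j] = ch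
def cntUp (l : List Char) (ch : Char) (i : Nat) : Nat :=
  if i < l.length then
    if l.getD i ' ' = ch then cntUp l ch (i + 1) + 1 else 0
  else 0
termination_by l.length - i

-- number of consecutive indices j < k (descending) with l[j] = ch
def cntDown (l : List Char) (ch : Char) : Nat → Nat
  | 0 => 0
  | k + 1 => if l.getD k ' ' = ch then cntDown l ch k + 1 else 0

theorem pvALoopUp_eq (l : List Char) (mid : Nat) :
    ∀ n i s, l.length ≤ i + n → pvALoopUp l mid i s = s + (cntUp l (l.getD mid ' ') i : Int) := by
  intro n
  induction n with
  | zero =>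
    intro i s h
    rw [pvALoopUp, cntUp, if_neg (by omega : ¬ i < l.length), if_neg (by omega : ¬ i < l.length)]
    omega
  | succ n ih =>
    intro i s h
    rw [pvALoopUp, cntUp]
    split_ifs with hi hc
    · rw [ih (i + 1) (s + 1) (by omega)]
      push_cast; ring
    · omega
    · omega

theorem pvALoopDown_eq (l : List Char) (mid : Nat) :
    ∀ k s, pvALoopDown l mid k s = s + (cntDown l (l.getD mid ' ') k : Int) := by
  intro k
  induction k with
  | zero => intro s; rw [pvALoopDown, cntDown]; omega
  | succ k ih =>
    intro s
    rw [pvALoopDown, cntDown]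
    split_ifs with hc
    · rw [ih (s + 1)]
      push_cast; ring
    · omega

-- cntUp counts exactly up to the first non-ch position e
theorem cntUp_eq_of_run (l : List Char) (ch : Char) :
    ∀ n j e, j ≤ e → e ≤ l.length → e ≤ j + n →
      (∀ k, j ≤ k → k < e → l.getD k ' ' = ch) →
      (e = l.length ∨ l.getD e ' ' ≠ ch) →
      cntUp l ch j = e - j := by
  intro n
  induction n with
  | zero =>
    intro j e h1 h2 h3 h4 h5
    have hje : j = e := by omega
    subst hje
    rw [cntUp]
    split_ifs with hj hc
    · rcases h5 with h5 | h5
      · omega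
      · exact absurd hc h5
    · omega
    · omega
  | succ n ih =>
    intro j e h1 h2 h3 h4 h5
    by_cases hje : j = e
    · subst hje
      rw [cntUp]
      split_ifs with hj hc
      · rcases h5 with h5 | h5
        · omega
        · exact absurd hc h5
      · omega
      · omega
    · have hjlt : j < e := by omega
      rw [cntUp, if_pos (by omega : j < l.length), if_pos (h4 j (le_refl j) hjlt)]
      rw [ih (j + 1) e (by omega) h2 (by omega) (fun k hk1 hk2 => h4 k (by omega) hk2) h5]
      omega

-- cntDown counts exactly down to the run start s
theorem cntDown_eq_of_run (l : List Char) (ch : Char) :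
    ∀ k s, s ≤ k →
      (∀ j, s ≤ j → j < k → l.getD j ' ' = ch) →
      (s = 0 ∨ l.getD (s - 1) ' ' ≠ ch) →
      cntDown l ch k = k - s := by
  intro k
  induction k with
  | zero => intro s h1 h2 h3; rw [cntDown]; omega
  | succ k ih =>
    intro s h1 h2 h3
    by_cases hsk : s = k + 1
    · subst hsk
      rcases h3 with h3 | h3
      · omega
      · simp only [Nat.add_sub_cancel] at h3
        rw [cntDown, if_neg h3]
        omega
    · have hs : s ≤ k := by omega
      rw [cntDown, if_pos (h2 k hs (by omega))]
      rw [ih s hs (fun j hj1 hj2 => h2 j hj1 (by omega)) h3]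
      omega

-- main loop invariant for B
theorem pvBLoop_eq (l : List Char) (mid : Nat) (hm : mid < l.length) :
    ∀ n i start, l.length ≤ i + n → i ≤ l.length → start < i → start ≤ mid →
      (∀ j, start ≤ j → j < i → l.getD j ' ' = l.getD start ' ') →
      (start = 0 ∨ l.getD (start - 1) ' ' ≠ l.getD start ' ') →
      pvBLoop l mid i start =
        1 + (cntUp l (l.getD mid ' ') (mid + 1) : Int) + (cntDown l (l.getD mid ' ') mid : Int) := by
  intro n
  induction n with
  | zero =>
    intro i start h0 h1 h2 h3 h4 h5
    have hi : i = l.length := by omega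
    subst hi
    rw [pvBLoop, if_neg (by omega : ¬ l.length < l.length), if_pos ⟨h3, hm⟩]
    have hch : l.getD mid ' ' = l.getD start ' ' := h4 mid h3 hm
    rw [cntUp_eq_of_run l (l.getD mid ' ') l.length (mid + 1) l.length (by omega) (le_refl _)
          (by omega) (fun k hk1 hk2 => by rw [h4 k (by omega) hk2, hch]) (Or.inl rfl)]
    rw [cntDown_eq_of_run l (l.getD mid ' ') mid start h3
          (fun j hj1 hj2 => by rw [h4 j hj1 (by omega), hch])
          (by rcases h5 with h | h
              · exact Or.inl h
              · exact Or.inr (by rw [hch]; exact h))]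
    omega
  | succ n ih =>
    intro i start h0 h1 h2 h3 h4 h5
    rw [pvBLoop]
    split_ifs with hi hne hc hfin
    · -- return inside the loop: the maximal run [start, i) contains mid
      have hch : l.getD mid ' ' = l.getD start ' ' := h4 mid h3 hc.2
      have hprev : l.getD (i - 1) ' ' = l.getD start ' ' := h4 (i - 1) (by omega) (by omega)
      rw [cntUp_eq_of_run l (l.getD mid ' ') l.length (mid + 1) i (by omega) (by omega)
            (by omega) (fun k hk1 hk2 => by rw [h4 k (by omega) hk2, hch])
            (Or.inr (by rw [hch, ← hprev]; exact hne))]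
      rw [cntDown_eq_of_run l (l.getD mid ' ') mid start hc.1
            (fun j hj1 hj2 => by rw [h4 j hj1 (by omega), hch])
            (by rcases h5 with h | h
                · exact Or.inl h
                · exact Or.inr (by rw [hch]; exact h))]
      omega
    · -- run boundary before mid: start a new run at i
      have hmi : i ≤ mid := by
        rcases Nat.lt_or_ge mid i with h | h
        · exact absurd ⟨h3, h⟩ hc
        · exact h
      exact ih (i + 1) i (by omega) (by omega) (by omega) hmi
        (fun j hj1 hj2 => by have hji : j = i := (by omega); rw [hji])
        (Or.inr (Ne.symm hne))
    · -- same char: the current run extends through i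
      have hne' : l.getD i ' ' = l.getD (i - 1) ' ' := not_not.mp hne
      exact ih (i + 1) start (by omega) (by omega) (by omega) h3
        (fun j hj1 hj2 => by
          by_cases hji : j < i
          · exact h4 j hj1 hji
          · have hj : j = i := by omega
            subst hj
            rw [hne']
            exact h4 (j - 1) (by omega) (by omega))
        h5
    · -- i = l.length already (loop exhausted)
      have hi' : i = l.length := by omega
      subst hi'
      have hch : l.getD mid ' ' = l.getD start ' ' := h4 mid h3 hm
      rw [cntUp_eq_of_run l (l.getD mid ' ') l.length (mid + 1) l.length (by omega) (le_refl _)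
            (by omega) (fun k hk1 hk2 => by rw [h4 k (by omega) hk2, hch]) (Or.inl rfl)]
      rw [cntDown_eq_of_run l (l.getD mid ' ') mid start h3
            (fun j hj1 hj2 => by rw [h4 j hj1 (by omega), hch])
            (by rcases h5 with h | h
                · exact Or.inl h
                · exact Or.inr (by rw [hch]; exact h))]
      omega
    · exact absurd ⟨h3, hm⟩ hfin

theorem calc_same_len_eq_cnt (c : String) :
    calc_same_len c =
      1 + (cntUp c.toList (c.toList.getD (c.toList.length / 2) ' ') (c.toList.length / 2 + 1) : Int)
        + (cntDown c.toList (c.toList.getD (c.toList.length / 2) ' ') (c.toList.length / 2) : Int) := by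
  unfold calc_same_len
  rw [pvALoopDown_eq, pvALoopUp_eq _ _ c.toList.length _ _ (by omega)]

-- ===== VERDICT (by name: the statement is the Claim_ definition above) =====
theorem calc_same_len_spec : Claim_equal_calc_same_len := by
  intro c _
  unfold Spec_calc_same_len calc_same_len_alt
  rw [calc_same_len_eq_cnt]
  by_cases hnil : c.toList.length = 0
  · have hl : c.toList = [] := List.eq_nil_of_length_eq_zero hnil
    rw [hl]
    simp [pvBLoop, cntUp, cntDown]
  · exact (pvBLoop_eq c.toList (c.toList.length / 2) (by omega) c.toList.length 1 0
      (by omega) (by omega) (by omega) (by omega)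
      (fun j hj1 hj2 => by have hj0 : j = 0 := (by omega); rw [hj0]) (Or.inl rfl)).symm
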